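-- pv_equiv track=rewrite | github.com/denovochem/agave_chem | agave_chem/mappers/neural/neural_mapper.py | get_duplicate_indices
-- ===== SOURCE A (Python) =====
-- from collections import defaultdict
-- from typing import Dict, List, Optional, Tuple, TypedDict
--
-- def get_duplicate_indices(list_of_lists: list) -> Dict[int, List[int]]:
--     result = {}
--     offset = 0
--
--     for sublist in list_of_lists:
--         # Group flattened indices by value within this sublist
--         value_to_indices = defaultdict(list)
--         for i, val in enumerate(sublist):
--             value_to_indices[val].append(offset + i)
--
--         # For each item, map to OTHER items with same value in the same sublist
--         for i, val in enumerate(sublist):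
--             flat_idx = offset + i
--             others = [idx for idx in value_to_indices[val] if idx != flat_idx]
--             if others:  # only include entries that actually have duplicates
--                 result[flat_idx] = others
--
--         offset += len(sublist)
--
--     return result
-- ===== SOURCE B (Python) =====
-- def get_duplicate_indices(list_of_lists: list):
--     # Dict-free rewrite: one pass per sublist, computing each element's
--     # duplicate partners by a direct scan instead of a grouping table.
--     result = {}
--     offset = 0
--     for sublist in list_of_lists:
--         for i, val in enumerate(sublist):
--             others = [offset + j for j, w in enumerate(sublist) if j != i and w == val]
--             if others:
--                 result[offset + i] = others
--         offset += len(sublist)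
--     return result
-- ===== Notes on version B (the rewrite author's own statement) =====
-- stated objective: simpler
-- what changed: B drops A's defaultdict grouping table and second filtering pass entirely: a single pass per sublist computes each element's duplicate partners by a direct comprehension scan of the sublist.
import Mathlib
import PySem

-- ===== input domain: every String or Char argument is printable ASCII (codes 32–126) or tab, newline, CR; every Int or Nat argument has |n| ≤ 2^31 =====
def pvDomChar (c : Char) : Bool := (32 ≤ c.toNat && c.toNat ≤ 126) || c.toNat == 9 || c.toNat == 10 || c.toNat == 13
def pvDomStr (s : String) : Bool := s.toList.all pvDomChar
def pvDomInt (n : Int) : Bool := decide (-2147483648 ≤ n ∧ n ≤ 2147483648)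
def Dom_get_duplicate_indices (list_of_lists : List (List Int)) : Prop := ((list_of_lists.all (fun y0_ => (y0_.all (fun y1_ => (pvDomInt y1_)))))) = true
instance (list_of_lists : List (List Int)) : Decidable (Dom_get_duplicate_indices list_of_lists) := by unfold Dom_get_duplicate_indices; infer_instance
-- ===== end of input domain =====

-- B is a dict-free rewrite of A (direct per-element scan instead of a grouping table), aimed at simplicity, not speed.

-- ===== PORT A =====
def get_duplicate_indices (list_of_lists : List (List Int)) : List (Int × List Int) :=
  (list_of_lists.foldl
    (fun (acc : PySem.Dict Int (List Int) × Int) sublist =>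
      let value_to_indices :=
        (PySem.List.enumerate sublist).foldl
          (fun d p => d.modify p.2 [] (· ++ [acc.2 + p.1])) PySem.Dict.empty
      let result :=
        (PySem.List.enumerate sublist).foldl
          (fun r p =>
            let flat_idx := acc.2 + p.1
            let others := (value_to_indices.getD p.2 []).filter (fun idx => idx ≠ flat_idx)
            if others ≠ [] then r.insert flat_idx others else r)
          acc.1
      (result, acc.2 + (sublist.length : Int)))
    (PySem.Dict.empty, 0)).1.items

-- ===== PORT B =====
def get_duplicate_indices_alt (list_of_lists : List (List Int)) : List (Int × List Int) :=
  (list_of_lists.foldl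
    (fun (acc : PySem.Dict Int (List Int) × Int) sublist =>
      ((PySem.List.enumerate sublist).foldl
        (fun r p =>
          let others :=
            ((PySem.List.enumerate sublist).filter
              (fun q => decide (q.1 ≠ p.1) && (q.2 == p.2))).map (fun q => acc.2 + q.1)
          if others ≠ [] then r.insert (acc.2 + p.1) others else r)
        acc.1,
       acc.2 + (sublist.length : Int)))
    (PySem.Dict.empty, 0)).1.items

-- ===== PRECONDITION & SPEC =====
def Spec_get_duplicate_indices (list_of_lists : List (List Int)) (out : List (Int × List Int)) : Prop := out = get_duplicate_indices_alt list_of_lists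
instance (list_of_lists : List (List Int)) (out : List (Int × List Int)) : Decidable (Spec_get_duplicate_indices list_of_lists out) := by unfold Spec_get_duplicate_indices; infer_instance

-- ===== CLAIM (what is proved, stated in full; the proofs are below) =====
def Claim_equal_get_duplicate_indices : Prop := ∀ (list_of_lists : List (List Int)), Dom_get_duplicate_indices list_of_lists → Spec_get_duplicate_indices list_of_lists (get_duplicate_indices list_of_lists)

-- ===== LEMMAS AND PROOFS =====

-- A's "others" (grouping table lookup, then remove self) equals B's direct scan.
theorem pv_others_eq (sublist : List Int) (offset : Int) (i : Int) (val : Int) :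
    (((PySem.List.enumerate sublist).foldl
        (fun d p => d.modify p.2 [] (· ++ [offset + p.1])) PySem.Dict.empty).getD val []).filter
      (fun idx => idx ≠ offset + i)
    = ((PySem.List.enumerate sublist).filter
        (fun q => decide (q.1 ≠ i) && (q.2 == val))).map (fun q => offset + q.1) := by
  have h1 : (PySem.List.enumerate sublist).foldl
      (fun d p => d.modify p.2 [] (· ++ [offset + p.1])) PySem.Dict.empty
      = ((PySem.List.enumerate sublist).map (fun p => (p.2, offset + p.1))).foldl
          (fun d q => d.modify q.1 [] (· ++ [q.2])) PySem.Dict.empty := by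
    rw [List.foldl_map]
  rw [h1, PySem.Dict.getD_foldl_modify_append]
  simp only [PySem.Dict.getD_empty, List.nil_append, List.filter_map, List.map_map,
    Function.comp_def, List.filter_filter]
  refine congrArg _ (List.filter_congr ?_)
  intro q _
  simp only [Bool.and_comm]
  congr 1
  simp only [decide_eq_decide]
  omega

theorem pv_fold_eq (list_of_lists : List (List Int)) :
    list_of_lists.foldl
      (fun (acc : PySem.Dict Int (List Int) × Int) sublist =>
        let value_to_indices :=
          (PySem.List.enumerate sublist).foldl
            (fun d p => d.modify p.2 [] (· ++ [acc.2 + p.1])) PySem.Dict.empty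
        let result :=
          (PySem.List.enumerate sublist).foldl
            (fun r p =>
              let flat_idx := acc.2 + p.1
              let others := (value_to_indices.getD p.2 []).filter (fun idx => idx ≠ flat_idx)
              if others ≠ [] then r.insert flat_idx others else r)
            acc.1
        (result, acc.2 + (sublist.length : Int)))
      (PySem.Dict.empty, 0)
    = list_of_lists.foldl
      (fun (acc : PySem.Dict Int (List Int) × Int) sublist =>
        ((PySem.List.enumerate sublist).foldl
          (fun r p =>
            let others :=
              ((PySem.List.enumerate sublist).filter
                (fun q => decide (q.1 ≠ p.1) && (q.2 == p.2))).map (fun q => acc.2 + q.1)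
            if others ≠ [] then r.insert (acc.2 + p.1) others else r)
          acc.1,
         acc.2 + (sublist.length : Int)))
      (PySem.Dict.empty, 0) := by
  apply PySem.List.foldl_congr_mem
  intro acc sublist _
  simp only []
  refine Prod.ext ?_ rfl
  dsimp only
  apply PySem.List.foldl_congr_mem
  intro r p _
  rw [pv_others_eq sublist acc.2 p.1 p.2]

-- ===== VERDICT (by name: the statement is the Claim_ definition above) =====
theorem get_duplicate_indices_spec : Claim_equal_get_duplicate_indices := by
  intro list_of_lists _
  unfold Spec_get_duplicate_indices get_duplicate_indices get_duplicate_indices_alt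
  rw [pv_fold_eq]
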